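-- pv_equiv track=rewrite | github.com/youngseo9603/coding_test | 프로그래머스/lv1/1845. 폰켓몬/폰켓몬.py | solution
-- ===== SOURCE A (Python) =====
-- def solution(nums):
--     answer = 0
--     d = dict()
--
--     n = len(nums)//2
--
--     for i in nums:
--         d[i] = d.get(i,0) + 1
--
--     if n < len(d):
--         answer = n
--     else:
--         answer = len(d)
--
--     return answer
-- ===== SOURCE B (Python) =====
-- def solution(nums):
--     s = sorted(nums)
--     cnt = 0
--     prev = None
--     for x in s:
--         if prev is None or x != prev:
--             cnt += 1
--         prev = x
--     return min(len(nums) // 2, cnt)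
-- ===== Notes on version B (the rewrite author's own statement) =====
-- stated objective: alternative
-- what changed: Replaces the dict/hash frequency-count with a sort followed by a single linear scan that counts value changes between adjacent elements, then takes min with len//2.
import Mathlib
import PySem

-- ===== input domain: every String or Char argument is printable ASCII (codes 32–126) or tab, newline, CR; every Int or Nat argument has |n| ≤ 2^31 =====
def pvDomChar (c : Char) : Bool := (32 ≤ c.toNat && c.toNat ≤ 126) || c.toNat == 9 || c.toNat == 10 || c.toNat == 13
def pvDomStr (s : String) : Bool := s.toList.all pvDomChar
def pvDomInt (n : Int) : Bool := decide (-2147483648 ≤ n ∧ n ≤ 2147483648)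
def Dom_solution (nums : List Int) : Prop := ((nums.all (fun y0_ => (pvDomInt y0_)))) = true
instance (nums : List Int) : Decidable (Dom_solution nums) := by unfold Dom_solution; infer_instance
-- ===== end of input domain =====

-- B sorts a copy and counts distinct values by a single adjacent-difference scan instead of building a frequency dict.

-- ===== PORT A =====
def solution (nums : List Int) : Int :=
  let d : PySem.Dict Int Int :=
    nums.foldl (fun d i => d.insert i (d.getD i 0 + 1)) PySem.Dict.empty
  let n : Int := PySem.Int.floordiv (nums.length : Int) 2
  if n < (d.size : Int) then n else (d.size : Int)

-- ===== PORT B =====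
-- loop body: (cnt, prev) updated by 'if prev is None or x != prev: cnt += 1; prev = x'
def pvStep (st : Int × Option Int) (x : Int) : Int × Option Int :=
  (if st.2 = none ∨ st.2 ≠ some x then st.1 + 1 else st.1, some x)

def solution_alt (nums : List Int) : Int :=
  let s := PySem.List.sorted nums (fun v => v) false
  let r := s.foldl pvStep (0, none)
  min (PySem.Int.floordiv (nums.length : Int) 2) r.1

-- ===== PRECONDITION & SPEC =====
def Spec_solution (nums : List Int) (out : Int) : Prop := out = solution_alt nums
instance (nums : List Int) (out : Int) : Decidable (Spec_solution nums out) := by unfold Spec_solution; infer_instance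

-- ===== CLAIM (what is proved, stated in full; the proofs are below) =====
def Claim_equal_solution : Prop := ∀ (nums : List Int), Dom_solution nums → Spec_solution nums (solution nums)

-- ===== LEMMAS AND PROOFS =====

-- A's dict has one entry per distinct value of nums, so A returns min(len//2, #distinct).
theorem pvA_eq (nums : List Int) :
    solution nums = min (PySem.Int.floordiv (nums.length : Int) 2) (nums.toFinset.card : Int) := by
  unfold solution
  have hk := PySem.Dict.keys_foldl_insert (l := nums)
    (f := fun (d : PySem.Dict Int Int) i => d.getD i 0 + 1) (d := PySem.Dict.empty)
  have hsize : ∀ (d : PySem.Dict Int Int), d.size = d.keys.length := by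
    intro d; simp [PySem.Dict.size, PySem.Dict.keys]
  have hcard : ((nums.foldl (fun (d : PySem.Dict Int Int) i => d.insert i (d.getD i 0 + 1))
      PySem.Dict.empty).size : Int) = (nums.toFinset.card : Int) := by
    rw [hsize, hk]
    simp only [PySem.Dict.keys_empty, PySem.Set.update_nil_left]
    have hnd : (PySem.Set.ofList nums).Nodup := PySem.Set.nodup_ofList nums
    have hfin : (PySem.Set.ofList nums).toFinset = nums.toFinset := by
      ext v; simp [PySem.Set.mem_ofList]
    rw [← List.toFinset_card_of_nodup hnd, hfin]
  simp only [hcard]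
  rw [min_def]; split_ifs <;> omega

-- B's scan from state (c, prev = p) over a sorted tail adds the number of distinct values above p.
theorem pvScan (xs : List Int) (p c : Int) (h : (p :: xs).Pairwise (· ≤ ·)) :
    (xs.foldl pvStep (c, some p)).1 = c + ((xs.toFinset.filter (fun v => p < v)).card : Int) := by
  induction xs generalizing p c with
  | nil => simp
  | cons x rest ih =>
    have hpx : p ≤ x := (List.pairwise_cons.1 h).1 x (by simp)
    have hrest : (x :: rest).Pairwise (· ≤ ·) := (List.pairwise_cons.1 h).2
    have hxr : ∀ v ∈ rest, x ≤ v := (List.pairwise_cons.1 hrest).1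
    by_cases hpx' : p = x
    · subst hpx'
      have : pvStep (c, some p) p = (c, some p) := by simp [pvStep]
      rw [List.foldl_cons, this, ih p c hrest]
      congr 2
      rw [List.toFinset_cons, Finset.filter_insert, if_neg (by simp)]
    · have : pvStep (c, some p) x = (c + 1, some x) := by simp [pvStep, hpx']
      rw [List.foldl_cons, this, ih x (c+1) hrest]
      have hlt : p < x := lt_of_le_of_ne hpx hpx'
      have hset : (x :: rest).toFinset.filter (fun v => p < v)
          = insert x (rest.toFinset.filter (fun v => x < v)) := by
        ext v
        simp only [List.toFinset_cons, Finset.mem_filter, Finset.mem_insert, List.mem_toFinset]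
        constructor
        · rintro ⟨hv | hv, hpv⟩
          · exact Or.inl hv
          · rcases eq_or_lt_of_le (hxr v hv) with hvx | hvx
            · exact Or.inl hvx.symm
            · exact Or.inr ⟨hv, hvx⟩
        · rintro (rfl | ⟨hv, hxv⟩)
          · exact ⟨Or.inl rfl, hlt⟩
          · exact ⟨Or.inr hv, hlt.trans hxv⟩
      rw [hset, Finset.card_insert_of_notMem (by simp)]
      push_cast; ring

theorem pvB_eq (nums : List Int) :
    solution_alt nums = min (PySem.Int.floordiv (nums.length : Int) 2) (nums.toFinset.card : Int) := by
  show min (PySem.Int.floordiv (nums.length : Int) 2)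
      ((PySem.List.sorted nums (fun v => v) false).foldl pvStep (0, none)).1 = _
  have hperm := PySem.List.sorted_perm (xs := nums) (key := fun v => v) (rev := false)
  have hfin : (PySem.List.sorted nums (fun v => v) false).toFinset = nums.toFinset :=
    List.toFinset_eq_of_perm _ _ hperm
  have hpw := PySem.List.sorted_pairwise (xs := nums) (key := fun v => v)
  rcases hs : PySem.List.sorted nums (fun v => v) false with _ | ⟨h, t⟩
  · have : nums = [] := by
      have := hperm; rw [hs] at this; exact (List.Perm.nil_eq this).symm
    simp [this]
  · rw [hs] at hfin hpw
    have hstep : pvStep (0, none) h = (1, some h) := by simp [pvStep]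
    rw [List.foldl_cons, hstep, pvScan t h 1 hpw]
    congr 1
    have hle : ∀ v ∈ t, h ≤ v := (List.pairwise_cons.1 hpw).1
    have hset : insert h (t.toFinset.filter (fun v => h < v)) = nums.toFinset := by
      rw [← hfin]
      ext v
      simp only [Finset.mem_insert, Finset.mem_filter, List.mem_toFinset, List.toFinset_cons]
      constructor
      · rintro (rfl | ⟨hv, _⟩)
        · simp
        · simp [hv]
      · rintro (rfl | hv)
        · exact Or.inl rfl
        · rcases eq_or_lt_of_le (hle v hv) with hvx | hvx
          · exact Or.inl hvx.symm
          · exact Or.inr ⟨hv, hvx⟩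
    rw [← hset, Finset.card_insert_of_notMem (by simp)]
    push_cast; ring

-- ===== VERDICT (by name: the statement is the Claim_ definition above) =====
theorem solution_spec : Claim_equal_solution := by
  intro nums _
  unfold Spec_solution
  rw [pvA_eq, pvB_eq]
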